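-- pv_equiv track=rewrite | github.com/KocUniversity/ps1-BYBakay | ps1b.py | bisection_searcher
-- ===== SOURCE A (Python) =====
-- def sequence_generator(n):
--   '''
--   Same as the one in ps1a. I explained this method in detail in that part.
--   '''
--   seq = []
--   for i in range(1, n + 1): # I start at 1 as instructed.
--       if i % 2 == 0:
--           seq.append((2**i) + 1) # (2^i + 1 for even numbers)
--       else:
--           seq.append((3**i) + 1) # (3^i + 1 for odd numbers)
--   return seq
--
-- def bisection_searcher(n, B, break_value=None, total=0):
--   '''
--   The way I generated and calculated the equation is the same as brute_force, I explained it in detail in ps1a.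
--   As instructed, I stored the minimum value that satified the equation in min_value. It's updated if a smaller one was found. (line 36)
--   break_value is used to store the previous guess. If guess is the same as Break_value, that means program has entered to a loop, so it's forced to stop. I was going to name it last_guess, but break_value sounded cooler to me. It's first value is None and it doesn't have an integer value until we find an unsatisfactory guess. It's not necessary to give it a new value when we find a satisfactory guess. (line 18)
--   The way bisection works in this case is, we make our first guess, then if we find a satisfying value, first we update high so our next guess will be smaller. If it's not satisfying, it updates low so our next guess will be bigger.(pretty much all lines below.)
--   When consecuttive guesses are the same, the program breaks and returns min_value, which is the smallest integer that satisfies the equation.(line 32)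
--
--   '''
--   seq = sequence_generator(n)
--   low = 0
--   high = 10000
--   guess = (high + low) // 2
--   min_value = None
--   while guess != break_value:
--     for i in range(len(seq)):
--       total += (seq[i] ** ((n - 1) - i)) * guess
--     if total > B:
--       high = guess
--       min_value = guess
--       total = 0
--     else:
--       low = guess
--       break_value = guess
--       total = 0
--     guess = (high + low) // 2
--   if min_value == None:
--     return -1
--   return min_value
-- ===== SOURCE B (Python) =====
-- def bisection_searcher(n, B, break_value=None, total=0):
--     # Closed form: the threshold sum S is constant across A's bisection probes,
--     # so compute it once and return the least guess g with S*g > B directly.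
--     S = 0
--     for i in range(1, n + 1):
--         base = 2 ** i + 1 if i % 2 == 0 else 3 ** i + 1
--         S += base ** (n - i)
--     if S == 0:
--         return -1
--     guess = B // S + 1
--     return guess if guess <= 9999 else -1
-- ===== Notes on version B (the rewrite author's own statement) =====
-- stated objective: faster
-- what changed: Replaces the bisection loop (which recomputes the full power-sum for every probe) by computing the constant sum S once and returning the least guess with S*guess > B as the closed form B//S + 1, capped at the search range.
-- outside the precondition, e.g. on bisection_searcher(0, 5, None, 10): A returns 5000, B returns -1; on bisection_searcher(2, 5, 2500, 0): A returns 5000, B returns 2; on bisection_searcher(1, -5, None, -6000): A returns 5001, B returns -4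
import Mathlib
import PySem

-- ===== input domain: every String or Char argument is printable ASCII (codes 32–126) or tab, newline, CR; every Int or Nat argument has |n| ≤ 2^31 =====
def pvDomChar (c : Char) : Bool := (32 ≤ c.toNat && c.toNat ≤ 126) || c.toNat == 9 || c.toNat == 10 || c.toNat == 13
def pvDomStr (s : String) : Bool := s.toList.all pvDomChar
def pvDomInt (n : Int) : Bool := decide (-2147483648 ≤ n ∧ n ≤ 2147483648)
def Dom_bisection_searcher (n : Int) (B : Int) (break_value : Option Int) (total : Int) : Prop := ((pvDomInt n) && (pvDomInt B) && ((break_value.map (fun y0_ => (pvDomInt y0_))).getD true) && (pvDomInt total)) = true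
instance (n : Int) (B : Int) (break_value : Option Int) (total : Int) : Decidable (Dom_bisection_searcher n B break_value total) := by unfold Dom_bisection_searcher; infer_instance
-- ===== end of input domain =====

-- B computes the constant threshold sum once and returns the closed form B//S + 1
-- instead of re-evaluating the sum inside a bisection loop (objective: faster).


-- ===== PORT A =====
-- sequence_generator: append loop over range(1, n+1)
def pvSeqGen (n : Int) : List Int :=
  (PySem.List.pyRange 1 (n + 1) 1).foldl
    (fun seq i => seq ++ [if PySem.Int.mod i 2 = 0 then 2 ^ i.toNat + 1 else 3 ^ i.toNat + 1]) []

-- the while loop; fuel only makes the recursion total (unreachable under Pre_, proved below)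
def pvLoopA (n : Int) (seq : List Int) (B : Int) :
    Nat → Int → Int → Option Int → Option Int → Int → Int
  | 0, _, _, _, minv, _ => match minv with | none => -1 | some v => v
  | f + 1, low, high, bv, minv, total =>
    let guess := PySem.Int.floordiv (high + low) 2
    if bv = some guess then
      match minv with | none => -1 | some v => v
    else
      let total' := (PySem.List.pyRange 0 (seq.length : Int) 1).foldl
        (fun t i => t + (PySem.List.pyGetD seq i 0) ^ ((n - 1) - i).toNat * guess) total
      if total' > B then
        pvLoopA n seq B f low guess bv (some guess) 0
      else
        pvLoopA n seq B f guess high (some guess) minv 0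

def bisection_searcher (n : Int) (B : Int) (break_value : Option Int) (total : Int) : Int :=
  pvLoopA n (pvSeqGen n) B 10002 0 10000 break_value none total

-- ===== PORT B =====
def bisection_searcher_alt (n : Int) (B : Int) (break_value : Option Int) (total : Int) : Int :=
  let S := (PySem.List.pyRange 1 (n + 1) 1).foldl
    (fun s i => s + (if PySem.Int.mod i 2 = 0 then 2 ^ i.toNat + 1 else 3 ^ i.toNat + 1) ^ (n - i).toNat) 0
  if S = 0 then -1
  else
    let guess := PySem.Int.floordiv B S + 1
    if guess ≤ 9999 then guess else -1

-- ===== PRECONDITION & SPEC =====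
-- the common value of both power sums
def pvBase (i : Int) : Int := if PySem.Int.mod i 2 = 0 then 2 ^ i.toNat + 1 else 3 ^ i.toNat + 1

def pvS (n : Int) : Int :=
  ((List.range n.toNat).map (fun k : Nat => pvBase (1 + (k : Int)) ^ ((n - 1) - (k : Int)).toNat)).sum

-- Pre_ excludes B < 0 (there A's while loop diverges unless a nonstandard break_value/total stops
-- it early), calls whose initial `total` flips the outcome of the first probe, and a break_value
-- equal to one of the fixed probe values A can compare it against (it then aborts the search):
-- in those cases A's returned value is an artefact of its internal loop state, which B does not keep.
-- the fixed halving chain of probe values against which A can still compare the caller's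
-- break_value (once a probe is unsatisfied, break_value is overwritten and the caller's
-- value no longer matters)
def pvChain : List Int := [5000, 2500, 1250, 625, 312, 156, 78, 39, 19, 9, 4, 2, 1, 0]

-- (for 17 ≤ n the sum pvS n is so large that, within Dom's |B|,|total| ≤ 2^31, the first
-- probe can never flip, so the iff need not be evaluated there)
def Pre_bisection_searcher (n : Int) (B : Int) (break_value : Option Int) (total : Int) : Prop :=
  0 ≤ B ∧ (17 ≤ n ∨ (pvS n * 5000 + total > B ↔ pvS n * 5000 > B)) ∧
    (break_value = none ∨ break_value.getD 0 ∉ pvChain)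
instance (n : Int) (B : Int) (break_value : Option Int) (total : Int) : Decidable (Pre_bisection_searcher n B break_value total) := by unfold Pre_bisection_searcher; infer_instance

def pvWitness_bisection_searcher : Int × Int × Option Int × Int := (2, 5, none, 0)

def Spec_bisection_searcher (n : Int) (B : Int) (break_value : Option Int) (total : Int) (out : Int) : Prop := out = bisection_searcher_alt n B break_value total
instance (n : Int) (B : Int) (break_value : Option Int) (total : Int) (out : Int) : Decidable (Spec_bisection_searcher n B break_value total out) := by unfold Spec_bisection_searcher; infer_instance

-- ===== CLAIM (what is proved, stated in full; the proofs are below) =====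
def Claim_equal_bisection_searcher : Prop := ∀ (n : Int) (B : Int) (break_value : Option Int) (total : Int), Dom_bisection_searcher n B break_value total → Pre_bisection_searcher n B break_value total → Spec_bisection_searcher n B break_value total (bisection_searcher n B break_value total)

-- ===== LEMMAS AND PROOFS =====

theorem pvBase_nonneg (i : Int) : 0 ≤ pvBase i := by
  unfold pvBase; split <;> positivity

theorem pvS_nonneg (n : Int) : 0 ≤ pvS n := by
  apply List.sum_nonneg
  intro x hx
  simp only [List.mem_map] at hx
  obtain ⟨k, -, rfl⟩ := hx
  exact pow_nonneg (pvBase_nonneg _) _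

theorem alt_S_eq (n : Int) :
    (PySem.List.pyRange 1 (n + 1) 1).foldl
      (fun s i => s + (if PySem.Int.mod i 2 = 0 then 2 ^ i.toNat + 1 else 3 ^ i.toNat + 1) ^ (n - i).toNat) 0
    = pvS n := by
  show (PySem.List.pyRange 1 (n + 1) 1).foldl (fun s i => s + pvBase i ^ (n - i).toNat) 0 = pvS n
  rw [PySem.List.foldl_add, PySem.List.pyRange_one, List.map_map]
  unfold pvS
  have hn : (n + 1 - 1).toNat = n.toNat := by omega
  rw [hn, zero_add]
  congr 1
  apply List.map_congr_left
  intro k _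
  have he : (n - (1 + (k : Int))).toNat = ((n - 1) - (k : Int)).toNat := by omega
  simp [Function.comp, he]

theorem pvSeqGen_eq (n : Int) : pvSeqGen n = (PySem.List.pyRange 1 (n + 1) 1).map pvBase := by
  show (PySem.List.pyRange 1 (n + 1) 1).foldl (fun seq i => seq ++ [pvBase i]) [] = _
  simpa using PySem.List.foldl_append_singleton_eq_map pvBase (PySem.List.pyRange 1 (n + 1) 1) []

theorem inner_sum_eq (n : Int) (g t : Int) :
    (PySem.List.pyRange 0 ((pvSeqGen n).length : Int) 1).foldl
      (fun acc i => acc + (PySem.List.pyGetD (pvSeqGen n) i 0) ^ ((n - 1) - i).toNat * g) t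
    = t + pvS n * g := by
  have hlen : (pvSeqGen n).length = n.toNat := by
    rw [pvSeqGen_eq, List.length_map, PySem.List.length_pyRange_one]; omega
  rw [PySem.List.foldl_add, PySem.List.pyRange_one, List.map_map]
  congr 1
  have h0 : ((pvSeqGen n).length - 0 : Int).toNat = n.toNat := by omega
  rw [h0]
  unfold pvS
  rw [← List.sum_map_mul_right]
  congr 1
  apply List.map_congr_left
  intro k hk
  simp only [List.mem_range] at hk
  have hval : (pvSeqGen n)[k]? = some (pvBase (1 + (k : Int))) := by
    have hr : k < (PySem.List.pyRange 1 (n + 1) 1).length := by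
      rw [PySem.List.length_pyRange_one]; omega
    rw [pvSeqGen_eq, List.getElem?_map, List.getElem?_eq_getElem hr,
      PySem.List.getElem_pyRange_one, Option.map_some]
  simp [hval]

theorem alt_eq_closed (n : Int) (B : Int) (bv : Option Int) (t : Int) (hB : 0 ≤ B) :
    bisection_searcher_alt n B bv t
    = if pvS n * 9999 ≤ B then -1 else PySem.Int.floordiv B (pvS n) + 1 := by
  simp only [bisection_searcher_alt]
  rw [alt_S_eq]
  by_cases hS : pvS n = 0
  · rw [if_pos hS, if_pos (by rw [hS]; simpa using hB)]
  · have hSpos : 0 < pvS n := lt_of_le_of_ne (pvS_nonneg n) (Ne.symm hS)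
    rw [if_neg hS]
    by_cases hle : PySem.Int.floordiv B (pvS n) + 1 ≤ 9999
    · rw [if_pos hle, if_neg]
      intro hcon
      have := (PySem.Int.le_floordiv_iff_mul_le hSpos).2
        (by linarith [mul_comm (pvS n) (9999 : Int)] : (9999 : Int) * pvS n ≤ B)
      omega
    · rw [if_neg hle, if_pos]
      have h9 : (9999 : Int) ≤ PySem.Int.floordiv B (pvS n) := by omega
      have := (PySem.Int.le_floordiv_iff_mul_le hSpos).1 h9
      linarith [mul_comm (pvS n) (9999 : Int)]

-- value returned at loop exit, when high = low + 1
def pvRet : Option Int → Int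
  | none => -1
  | some v => v

theorem pvExit (n : Int) (B : Int) (low : Int) (minv : Option Int) (hB : 0 ≤ B)
    (hlow : pvS n * low ≤ B)
    (hminv : (minv = none ∧ low + 1 = 10000) ∨
      (minv = some (low + 1) ∧ pvS n * (low + 1) > B ∧ low + 1 ≤ 9999)) :
    pvRet minv = if pvS n * 9999 ≤ B then -1 else PySem.Int.floordiv B (pvS n) + 1 := by
  rcases hminv with ⟨hm, h10⟩ | ⟨hm, hsat, h9⟩
  · subst hm
    have h : low = 9999 := by omega
    rw [h] at hlow
    show (-1 : Int) = _
    rw [if_pos hlow]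
  · subst hm
    have hSpos : 0 < pvS n := by nlinarith [pvS_nonneg n]
    show low + 1 = _
    rw [if_neg (by nlinarith)]
    have hfd : PySem.Int.floordiv B (pvS n) = low :=
      (PySem.Int.floordiv_eq_iff_of_pos hSpos).2 ⟨by nlinarith, by nlinarith⟩
    omega

-- one unfolding of the while loop (fuel stated as f + 1 so that rewriting never recurses)
theorem loopA_succ (n : Int) (seq : List Int) (B : Int) (f : Nat) (low high total : Int)
    (bv minv : Option Int) :
    pvLoopA n seq B (f + 1) low high bv minv total =
      if bv = some (PySem.Int.floordiv (high + low) 2) then pvRet minv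
      else if (PySem.List.pyRange 0 (seq.length : Int) 1).foldl
          (fun t i => t + (PySem.List.pyGetD seq i 0) ^ ((n - 1) - i).toNat
            * PySem.Int.floordiv (high + low) 2) total > B then
        pvLoopA n seq B f low (PySem.Int.floordiv (high + low) 2) bv
          (some (PySem.Int.floordiv (high + low) 2)) 0
      else
        pvLoopA n seq B f (PySem.Int.floordiv (high + low) 2) high
          (some (PySem.Int.floordiv (high + low) 2)) minv 0 := by
  simp only [pvLoopA]
  rcases minv with - | v <;> rfl

-- the bisection loop invariant
theorem loopA_closed (n : Int) (B : Int) (hB : 0 ≤ B) :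
    ∀ (f : Nat) (low high : Int) (bv minv : Option Int),
      ((high - low).toNat + 2 ≤ f) →
      0 ≤ low → low < high → high ≤ 10000 →
      pvS n * low ≤ B →
      ((minv = none ∧ high = 10000) ∨ (minv = some high ∧ pvS n * high > B ∧ high ≤ 9999)) →
      (bv = some low ∨ (low = 0 ∧ (high = 10000 ∨ high ∈ pvChain) ∧
        (bv = none ∨ ∃ v, bv = some v ∧ v ∉ pvChain))) →
      pvLoopA n (pvSeqGen n) B f low high bv minv 0
        = if pvS n * 9999 ≤ B then -1 else PySem.Int.floordiv B (pvS n) + 1 := by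
  intro f
  induction f with
  | zero => intro low high bv minv hfuel h0 hlh hhi hlow hminv hbv; omega
  | succ f ih =>
    intro low high bv minv hfuel h0 hlh hhi hlow hminv hbv
    have hg1 : low ≤ PySem.Int.floordiv (high + low) 2 :=
      (PySem.Int.le_floordiv_iff_mul_le (by norm_num)).2 (by linarith)
    have hg2 : PySem.Int.floordiv (high + low) 2 < high :=
      (PySem.Int.floordiv_lt_iff_lt_mul (by norm_num)).2 (by linarith)
    set g := PySem.Int.floordiv (high + low) 2 with hgdef
    by_cases hexit : bv = some g
    · have hbv' : bv = some low := by
        rcases hbv with h | ⟨hlow0, hhigh, hb⟩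
        · exact h
        · exfalso
          have hgch : g ∈ pvChain := by
            rw [hgdef, hlow0]
            rcases hhigh with h10 | hc
            · rw [h10]; decide
            · simp only [pvChain, List.mem_cons, List.not_mem_nil, or_false] at hc
              rcases hc with rfl | rfl | rfl | rfl | rfl | rfl | rfl | rfl | rfl | rfl | rfl | rfl | rfl | rfl <;> decide
          rcases hb with h | ⟨v, hv, hvn⟩
          · rw [h] at hexit; cases hexit
          · rw [hv] at hexit
            exact hvn (Option.some_inj.1 hexit ▸ hgch)
      have hgl : g = low := by
        rw [hbv'] at hexit
        exact (Option.some_inj.1 hexit).symm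
      have hh1 : high = low + 1 := by
        have heq : PySem.Int.floordiv (high + low) 2 = low := by rw [← hgdef, hgl]
        have hb := (PySem.Int.floordiv_eq_iff_of_pos (by norm_num : (0:Int) < 2)).1 heq
        omega
      simp only [pvLoopA]
      rw [if_pos hexit]
      show pvRet minv = _
      exact pvExit n B low minv hB hlow (by rw [hh1] at hminv; exact hminv)
    · simp only [pvLoopA]
      rw [if_neg hexit, inner_sum_eq n g 0, zero_add]
      by_cases hsat : pvS n * g > B
      · have hlg : low < g := by
          rcases eq_or_lt_of_le hg1 with h | h
          · exfalso; rw [← h] at hsat; linarith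
          · exact h
        rw [if_pos hsat]
        refine ih low g bv (some g) (by omega) h0 hlg (by omega) hlow
          (Or.inr ⟨rfl, hsat, by omega⟩) ?_
        rcases hbv with h | ⟨hlow0, hhigh, hb⟩
        · exact Or.inl h
        · refine Or.inr ⟨hlow0, Or.inr ?_, hb⟩
          rw [hgdef, hlow0]
          rcases hhigh with h10 | hc
          · rw [h10]; decide
          · simp only [pvChain, List.mem_cons, List.not_mem_nil, or_false] at hc
            rcases hc with rfl | rfl | rfl | rfl | rfl | rfl | rfl | rfl | rfl | rfl | rfl | rfl | rfl | rfl <;> decide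
      · rw [if_neg hsat]
        push_neg at hsat
        by_cases hgl : g = low
        · have hh1 : high = low + 1 := by
            have heq : PySem.Int.floordiv (high + low) 2 = low := by rw [← hgdef, hgl]
            have hb := (PySem.Int.floordiv_eq_iff_of_pos (by norm_num : (0:Int) < 2)).1 heq
            omega
          obtain ⟨f', rfl⟩ : ∃ f', f = f' + 1 := ⟨f - 1, by omega⟩
          simp only [pvLoopA]
          have heq2 : PySem.Int.floordiv (high + g) 2 = g := by
            refine (PySem.Int.floordiv_eq_iff_of_pos (by norm_num : (0:Int) < 2)).2 ⟨by omega, by omega⟩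
          rw [if_pos (by rw [heq2])]
          show pvRet minv = _
          exact pvExit n B low minv hB hlow (by rw [hh1] at hminv; exact hminv)
        · have hlg : low < g := lt_of_le_of_ne hg1 (Ne.symm hgl)
          exact ih g high (some g) minv (by omega) (by omega) hg2 hhi hsat hminv (Or.inl rfl)

-- ===== VERDICT (by name: the statement is the Claim_ definition above) =====
theorem bisection_searcher_spec : Claim_equal_bisection_searcher := by
  intro n B bv t hDom hPre
  obtain ⟨hB, hflip, hbv0⟩ := hPre
  have hDom' := hDom
  simp only [Dom_bisection_searcher, pvDomInt, Bool.and_eq_true, decide_eq_true_eq] at hDom'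
  obtain ⟨⟨⟨-, hBb⟩, -⟩, htb⟩ := hDom'
  have hiff : pvS n * 5000 + t > B ↔ pvS n * 5000 > B := by
    rcases hflip with hn | h
    · have hmem : (4 : Int) ^ ((n - 1) - ((0 : Nat) : Int)).toNat ∈
          (List.range n.toNat).map
            (fun k : Nat => pvBase (1 + (k : Int)) ^ ((n - 1) - (k : Int)).toNat) := by
        refine List.mem_map.2 ⟨0, List.mem_range.2 (by omega), ?_⟩
        norm_num [pvBase, show PySem.Int.mod 1 2 = 1 from by decide]
      have hterm : (4 : Int) ^ ((n - 1) - ((0 : Nat) : Int)).toNat ≤ pvS n := by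
        refine List.single_le_sum ?_ _ hmem
        intro x hx
        simp only [List.mem_map] at hx
        obtain ⟨k, -, rfl⟩ := hx
        exact pow_nonneg (pvBase_nonneg _) _
      have h16 : (4 : Int) ^ (16 : Nat) ≤ (4 : Int) ^ ((n - 1) - ((0 : Nat) : Int)).toNat := by
        apply pow_le_pow_right₀ (by norm_num)
        omega
      have hS : (4294967296 : Int) ≤ pvS n := by
        calc (4294967296 : Int) = 4 ^ (16 : Nat) := by norm_num
        _ ≤ _ := le_trans h16 hterm
      constructor
      · intro _; linarith [hBb.2]
      · intro _; linarith [hBb.2, htb.1]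
    · exact h
  have hbv : bv = none ∨ (∃ v, bv = some v ∧ v ∉ pvChain) := by
    rcases hbv0 with h | h
    · exact Or.inl h
    · cases hbvc : bv with
      | none => exact Or.inl rfl
      | some v => rw [hbvc] at h; exact Or.inr ⟨v, rfl, by simpa using h⟩
  show bisection_searcher n B bv t = bisection_searcher_alt n B bv t
  rw [alt_eq_closed n B bv t hB]
  -- unfold the first iteration of A's loop by hand (it is the only one that sees `total`)
  show pvLoopA n (pvSeqGen n) B 10002 0 10000 bv none t = _
  have hne : ¬ bv = some (PySem.Int.floordiv (10000 + 0) 2) := by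
    rcases hbv with h | ⟨v, hv, hout⟩
    · rw [h]; simp
    · rw [hv]
      intro hc
      have hv5 : v = (5000 : Int) := by
        have := Option.some_inj.1 hc
        rw [show PySem.Int.floordiv ((10000 : Int) + 0) 2 = 5000 from by decide] at this
        exact this
      exact hout (by rw [hv5]; decide)
  rw [show (10002 : Nat) = 10001 + 1 from rfl, loopA_succ]
  rw [if_neg hne, inner_sum_eq n _ t,
    show PySem.Int.floordiv ((10000 : Int) + 0) 2 = 5000 from by decide]
  by_cases hsat : pvS n * 5000 > B
  · rw [if_pos (show t + pvS n * 5000 > B from by linarith [hiff.2 hsat])]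
    exact loopA_closed n B hB 10001 0 5000 bv (some 5000) (by omega) le_rfl (by norm_num)
      (by norm_num) (by simpa using hB) (Or.inr ⟨rfl, hsat, by norm_num⟩)
      (Or.inr ⟨rfl, Or.inr (by decide), hbv⟩)
  · rw [if_neg (show ¬ t + pvS n * 5000 > B from fun hc => hsat (hiff.1 (by linarith)))]
    exact loopA_closed n B hB 10001 5000 10000 (some 5000) none (by omega) (by norm_num)
      (by norm_num) le_rfl (by linarith [not_lt.1 hsat]) (Or.inl ⟨rfl, rfl⟩)
      (Or.inl rfl)
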